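-- pv_equiv track=rewrite | github.com/fls-bioinformatics-core/RnaChipIntegrator | rnachipintegrator/utils.py | make_errline
-- ===== SOURCE A (Python) =====
-- def make_errline(line,bad_fields=[]):
--     """Return an 'error line' indicating problem fields in a string
--
--     Given a tab-delimited line and a list of integer indices
--     indicating which fields in the line have problems, this function
--     returns a tab-delimited string where the original fields are
--     replaced by either spaces or '^' characters.
--
--     When printed beneath the original line, the '^'s indicate which
--     fields are 'bad' according to the supplied indices, e.g.
--
--     Input line: 'good    good    bad    bad    good'
--     Error line: '                ^^^    ^^^        '
--
--     Arguments:
--       line: string where tabs delimit fields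
--       bad_fields: list of integer indices corresponding to 'bad'
--         values in 'line'
--
--     Returns:
--       Tab-delimited 'error line' to be printed beneath the original
--       line, to indicate which fields are 'bad'.
--     """
--     # Indicate problem field(s)
--     errline = []
--     items = line.rstrip().split('\t')
--     for i in range(len(items)):
--         if i in bad_fields:
--             errline.append("^"*len(items[i]))
--         else:
--             errline.append(" "*len(items[i]))
--     return '\t'.join(errline)
-- ===== SOURCE B (Python) =====
-- def make_errline(line, bad_fields=[]):
--     # Single character-level pass: no split, a running field counter instead.
--     bad = set(bad_fields)
--     out = []
--     field = 0
--     for ch in line.rstrip():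
--         if ch == '\t':
--             out.append('\t')
--             field += 1
--         else:
--             out.append('^' if field in bad else ' ')
--     return ''.join(out)
-- ===== Notes on version B (the rewrite author's own statement) =====
-- stated objective: alternative
-- what changed: Replaces split-on-tab plus per-field marker strings joined by tabs with a single character-level pass over line.rstrip() that keeps a running field counter and emits one output character per input character.
import Mathlib
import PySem

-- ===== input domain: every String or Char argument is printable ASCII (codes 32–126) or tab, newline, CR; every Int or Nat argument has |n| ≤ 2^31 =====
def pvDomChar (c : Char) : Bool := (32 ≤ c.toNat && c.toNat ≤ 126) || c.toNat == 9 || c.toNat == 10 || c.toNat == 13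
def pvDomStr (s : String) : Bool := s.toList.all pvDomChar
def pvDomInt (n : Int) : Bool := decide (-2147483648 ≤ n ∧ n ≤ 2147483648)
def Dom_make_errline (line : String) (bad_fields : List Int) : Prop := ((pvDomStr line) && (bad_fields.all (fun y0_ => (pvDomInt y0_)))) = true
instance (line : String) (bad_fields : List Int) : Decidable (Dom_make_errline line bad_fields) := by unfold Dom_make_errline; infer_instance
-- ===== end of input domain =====

-- B replaces split-on-tab + per-field marker strings by a single character-level pass with a running field counter (objective: alternative decomposition).

-- ===== PORT A =====
def make_errline (line : String) (bad_fields : List Int) : String :=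
  -- items = line.rstrip().split('\t'); the separator "\t" is nonempty so split? is always `some`
  let items : List String := (PySem.Str.split? (PySem.Str.rstrip line) "\t").getD []
  -- for i in range(len(items)): append "^"*len(items[i]) or " "*len(items[i])
  let errline : List String :=
    (PySem.List.pyRange 0 (items.length : Int) 1).foldl
      (fun acc i =>
        if bad_fields.contains i then
          acc ++ [String.ofList (PySem.List.pyRepeat ['^'] (PySem.Str.len (PySem.List.pyGetD items i "")))]
        else
          acc ++ [String.ofList (PySem.List.pyRepeat [' '] (PySem.Str.len (PySem.List.pyGetD items i "")))])
      []
  PySem.Str.join "\t" errline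

-- ===== PORT B =====
def make_errline_alt (line : String) (bad_fields : List Int) : String :=
  let bad : PySem.Set Int := PySem.Set.ofList bad_fields
  let res : List Char × Int :=
    (PySem.Str.rstrip line).toList.foldl
      (fun (st : List Char × Int) ch =>
        if ch = '\t' then (st.1 ++ ['\t'], st.2 + 1)
        else (st.1 ++ [if bad.contains st.2 then '^' else ' '], st.2))
      ([], 0)
  String.ofList res.1

-- ===== PRECONDITION & SPEC =====
def Spec_make_errline (line : String) (bad_fields : List Int) (out : String) : Prop := out = make_errline_alt line bad_fields
instance (line : String) (bad_fields : List Int) (out : String) : Decidable (Spec_make_errline line bad_fields out) := by unfold Spec_make_errline; infer_instance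

-- ===== CLAIM (what is proved, stated in full; the proofs are below) =====
def Claim_equal_make_errline : Prop := ∀ (line : String) (bad_fields : List Int), Dom_make_errline line bad_fields → Spec_make_errline line bad_fields (make_errline line bad_fields)

-- ===== LEMMAS AND PROOFS =====

-- marker character of field k
def markCh (bad_fields : List Int) (k : Int) : Char := if bad_fields.contains k then '^' else ' '

-- B's character walk, as a direct recursion
def walk (bad_fields : List Int) : List Char → Int → List Char
  | [], _ => []
  | c :: cs, k =>
      if c = '\t' then '\t' :: walk bad_fields cs (k + 1)
      else markCh bad_fields k :: walk bad_fields cs k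

-- split on a single tab, structural recursion with a reversed current-field accumulator
def splitCh : List Char → List Char → List (List Char)
  | [], cur => [cur.reverse]
  | c :: cs, cur => if c = '\t' then cur.reverse :: splitCh cs [] else splitCh cs (c :: cur)

-- A's per-field loop result, as a recursion with a running index
def amap (bad_fields : List Int) : List String → Int → List String
  | [], _ => []
  | it :: rest, k =>
      (if bad_fields.contains k then String.ofList (PySem.List.pyRepeat ['^'] (PySem.Str.len it))
       else String.ofList (PySem.List.pyRepeat [' '] (PySem.Str.len it))) :: amap bad_fields rest (k + 1)

theorem amap_cons (bad_fields : List Int) (it : String) (rest : List String) (k : Int) :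
    amap bad_fields (it :: rest) k
      = (if bad_fields.contains k then String.ofList (PySem.List.pyRepeat ['^'] (PySem.Str.len it))
         else String.ofList (PySem.List.pyRepeat [' '] (PySem.Str.len it))) :: amap bad_fields rest (k + 1) := rfl

theorem splitCh_ne_nil (cs cur : List Char) : splitCh cs cur ≠ [] := by
  induction cs generalizing cur with
  | nil => simp [splitCh]
  | cons c cs ih => by_cases h : c = '\t' <;> simp [splitCh, h, ih]

theorem go_single (cs : List Char) : ∀ (fuel : Nat) (cur : List Char) (acc : List (List Char)),
    cs.length < fuel →
    PySem.Chars.splitOn.go ['\t'] fuel cs cur acc = acc.reverse ++ splitCh cs cur := by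
  induction cs with
  | nil =>
      intro fuel cur acc h
      cases fuel with
      | zero => omega
      | succ f => simp [PySem.Chars.splitOn.go, splitCh]
  | cons c cs ih =>
      intro fuel cur acc h
      cases fuel with
      | zero => omega
      | succ f =>
        by_cases hc : c = '\t'
        · subst hc
          simp only [PySem.Chars.splitOn.go, List.isPrefixOf, BEq.rfl, Bool.true_and,
            if_pos, List.length_cons, List.drop_succ_cons, List.length_nil, List.drop_zero]
          rw [ih f [] (cur.reverse :: acc) (by simpa using Nat.lt_of_succ_lt_succ h)]
          simp [splitCh]
        · have hpre : List.isPrefixOf ['\t'] (c :: cs) = false := by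
            simp [List.isPrefixOf]
            intro hh; exact absurd hh.symm hc
          simp only [PySem.Chars.splitOn.go, hpre, Bool.false_eq_true, if_false]
          rw [ih f (c :: cur) acc (by simpa using Nat.lt_of_succ_lt_succ h)]
          simp [splitCh, hc]

theorem splitOn_single (cs : List Char) : PySem.Chars.splitOn cs ['\t'] = splitCh cs [] := by
  unfold PySem.Chars.splitOn
  rw [go_single cs (cs.length + 1) [] [] (by omega)]
  simp

theorem contains_ofList (l : List Int) (x : Int) :
    PySem.Set.contains (PySem.Set.ofList l) x = l.contains x := by
  rw [Bool.eq_iff_iff, PySem.Set.contains_iff, PySem.Set.mem_ofList, List.contains_iff_mem]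

-- B's fold is the walk
theorem B_fold (bad_fields : List Int) (cs : List Char) :
    ∀ (acc : List Char) (k : Int),
    (cs.foldl
      (fun (st : List Char × Int) ch =>
        if ch = '\t' then (st.1 ++ ['\t'], st.2 + 1)
        else (st.1 ++ [if (PySem.Set.ofList bad_fields).contains st.2 then '^' else ' '], st.2))
      (acc, k)).1 = acc ++ walk bad_fields cs k := by
  induction cs with
  | nil => intro acc k; simp [walk]
  | cons c cs ih =>
      intro acc k
      simp only [contains_ofList] at ih ⊢
      by_cases hc : c = '\t'
      · subst hc
        simp only [List.foldl_cons, if_pos]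
        rw [ih (acc ++ ['\t']) (k + 1)]
        simp [walk]
      · simp only [List.foldl_cons, hc, if_false]
        rw [ih (acc ++ [if bad_fields.contains k then '^' else ' ']) k]
        simp [walk, markCh, hc]

-- A's index loop over pyRange is amap of the suffix
theorem A_loop (bad_fields : List Int) (items : List String) :
    ∀ (fuel j : Nat), j + fuel = items.length → ∀ (acc : List String),
    (PySem.List.pyRange (j : Int) (items.length : Int) 1).foldl
      (fun acc i =>
        if bad_fields.contains i then
          acc ++ [String.ofList (PySem.List.pyRepeat ['^'] (PySem.Str.len (PySem.List.pyGetD items i "")))]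
        else
          acc ++ [String.ofList (PySem.List.pyRepeat [' '] (PySem.Str.len (PySem.List.pyGetD items i "")))])
      acc
    = acc ++ amap bad_fields (items.drop j) (j : Int) := by
  intro fuel
  induction fuel with
  | zero =>
      intro j hj acc
      have hj' : j = items.length := by omega
      subst hj'
      have : PySem.List.pyRange (items.length : Int) (items.length : Int) 1 = [] := by
        simp [PySem.List.pyRange]
      simp [this, amap]
  | succ f ih =>
      intro j hj acc
      have hjlt : j < items.length := by omega
      have hlt : (j : Int) < (items.length : Int) := by exact_mod_cast hjlt
      rw [PySem.List.pyRange_one_cons hlt, List.foldl_cons]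
      have hget : PySem.List.pyGetD items (j : Int) "" = items.getD j "" :=
        PySem.List.pyGetD_natCast items j ""
      have hdrop : items.drop j = items[j] :: items.drop (j + 1) :=
        List.drop_eq_getElem_cons hjlt
      have hgetD : items.getD j "" = items[j] := List.getD_eq_getElem items "" hjlt
      have hnext := ih (j + 1) (by omega)
      by_cases hb : (j : Int) ∈ bad_fields
      · have hbc : bad_fields.contains (j : Int) = true := by simpa using hb
        simp only [hbc, if_pos, hget, hgetD]
        have := hnext (acc ++ [String.ofList (PySem.List.pyRepeat ['^'] (PySem.Str.len items[j]))])
        push_cast at this ⊢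
        rw [this, hdrop]
        simp [amap, hb]
      · have hbc : bad_fields.contains (j : Int) = false := by simpa using hb
        simp only [hbc, Bool.false_eq_true, if_false, hget, hgetD]
        have := hnext (acc ++ [String.ofList (PySem.List.pyRepeat [' '] (PySem.Str.len items[j]))])
        push_cast at this ⊢
        rw [this, hdrop]
        simp [amap, hb]

-- the central correspondence: join of A's per-field markers = B's walk
theorem main_lemma (bad_fields : List Int) (cs : List Char) :
    ∀ (cur : List Char) (k : Int),
    PySem.Chars.join ['\t']
      (List.map String.toList (amap bad_fields (List.map String.ofList (splitCh cs cur)) k))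
    = List.replicate cur.length (markCh bad_fields k) ++ walk bad_fields cs k := by
  induction cs with
  | nil =>
      intro cur k
      by_cases hb : k ∈ bad_fields <;>
        simp [splitCh, amap, walk, markCh, hb, PySem.List.pyRepeat_singleton,
          PySem.Str.len_eq, PySem.Chars.join_singleton]
  | cons c cs ih =>
      intro cur k
      by_cases hc : c = '\t'
      · subst hc
        obtain ⟨p, rest, hpr⟩ : ∃ p rest, splitCh cs [] = p :: rest := by
          cases h : splitCh cs [] with
          | nil => exact absurd h (splitCh_ne_nil cs [])
          | cons p rest => exact ⟨p, rest, rfl⟩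
        have this1 := ih [] (k + 1)
        rw [hpr] at this1
        simp only [List.map_cons, amap_cons] at this1
        simp only [splitCh, if_pos, hpr, List.map_cons, amap_cons]
        rw [PySem.Chars.join_cons_cons, this1]
        by_cases hb : k ∈ bad_fields <;>
          simp [markCh, hb, PySem.List.pyRepeat_singleton, PySem.Str.len_eq, walk]
      · simp only [splitCh, hc, if_false, walk]
        rw [ih (c :: cur) k]
        simp only [List.length_cons, List.replicate_succ']
        simp [markCh]

-- ===== VERDICT (by name: the statement is the Claim_ definition above) =====
theorem make_errline_spec : Claim_equal_make_errline := by
  intro line bad_fields _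
  unfold Spec_make_errline make_errline make_errline_alt
  have hs := PySem.Str.split?_map (PySem.Str.rstrip line) "\t"
  have hT : "\t".toList = ['\t'] := rfl
  rw [hT] at hs
  simp only [PySem.Chars.split?, List.isEmpty_cons, Bool.false_eq_true, if_false,
    splitOn_single] at hs
  cases h : PySem.Str.split? (PySem.Str.rstrip line) "\t" with
  | none => rw [h] at hs; simp at hs
  | some items =>
      rw [h] at hs
      simp only [Option.map_some, Option.some.injEq] at hs
      have hitems : items = List.map String.ofList (splitCh (PySem.Str.rstrip line).toList []) := by
        rw [← hs, List.map_map]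
        simp [Function.comp_def]
      simp only [Option.getD_some]
      have hA := A_loop bad_fields items items.length 0 (by omega) []
      push_cast at hA
      rw [hA]
      simp only [List.nil_append, List.drop_zero]
      rw [B_fold bad_fields (PySem.Str.rstrip line).toList [] 0]
      rw [← String.toList_inj]
      rw [PySem.Str.toList_join, String.toList_ofList]
      have := main_lemma bad_fields (PySem.Str.rstrip line).toList [] 0
      simp only [List.length_nil, List.replicate_zero, List.nil_append] at this
      rw [hitems]
      simpa using this
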